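-- pv_equiv track=rewrite | github.com/Lucas1792003/Fundamental-of-Programming | Practical Examination (final)/Q2.py | unHiddenMessage
-- ===== SOURCE A (Python) =====
-- def unHiddenMessage(inStr):
--     count1 = 1
--     count2 = 3
--     ans = ''
--     while count1 < len(inStr):
--         ans+=inStr[count1]
--         count1 += count2
--         count2+=2
--     return ans
-- ===== SOURCE B (Python) =====
-- def is_square(k):
--     lo, hi = 0, k
--     while lo <= hi:
--         mid = (lo + hi) // 2
--         if mid * mid == k:
--             return True
--         if mid * mid < k:
--             lo = mid + 1
--         else:
--             hi = mid - 1
--     return False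
--
-- def unHiddenMessage(inStr):
--     return ''.join(c for i, c in enumerate(inStr) if i >= 1 and is_square(i))
-- ===== Notes on version B (the rewrite author's own statement) =====
-- stated objective: alternative
-- what changed: Instead of generating the square positions 1,4,9,... by A's odd-increment accumulator loop, B scans every position once with enumerate and keeps a character iff its index passes a binary-search perfect-square test, joining the survivors.
import Mathlib
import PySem

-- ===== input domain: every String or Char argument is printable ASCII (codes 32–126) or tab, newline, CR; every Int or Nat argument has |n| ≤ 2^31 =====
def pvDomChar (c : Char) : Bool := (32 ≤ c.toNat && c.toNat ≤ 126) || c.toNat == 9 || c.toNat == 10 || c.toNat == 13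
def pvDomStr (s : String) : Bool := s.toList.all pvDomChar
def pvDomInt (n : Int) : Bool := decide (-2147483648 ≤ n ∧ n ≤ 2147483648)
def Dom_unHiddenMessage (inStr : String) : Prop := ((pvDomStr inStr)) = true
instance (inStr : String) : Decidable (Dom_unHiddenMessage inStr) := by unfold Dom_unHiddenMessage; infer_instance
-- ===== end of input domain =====

-- B scans every position and keeps a character iff its index passes a binary-search
-- perfect-square test, instead of A's odd-increment generation of the square positions;
-- objective: alternative algorithm.

-- ===== PORT A =====
-- while count1 < len(inStr): ans += inStr[count1]; count1 += count2; count2 += 2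
-- (fuel = len(inStr) only makes the loop total: count1 grows by at least 3 per step,
-- so the fuel is never exhausted before the while-condition fails)
def unHiddenMessageLoopA (cs : List Char) : Nat → Nat → Nat → List Char → List Char
  | 0, _, _, ans => ans
  | fuel + 1, count1, count2, ans =>
    if h : count1 < cs.length then
      unHiddenMessageLoopA cs fuel (count1 + count2) (count2 + 2) (ans ++ [cs[count1]])
    else ans

def unHiddenMessage (inStr : String) : String :=
  String.mk (unHiddenMessageLoopA inStr.toList inStr.toList.length 1 3 [])

-- ===== PORT B =====
-- is_square: lo, hi = 0, k; while lo <= hi: mid = (lo+hi)//2; … (binary search)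
-- (fuel = (k+1).toNat only makes the loop total: the window hi+1-lo starts at k+1
-- and shrinks by at least 1 per step, so the fuel is never exhausted first)
def isSquareLoop (k : Int) : Nat → Int → Int → Bool
  | 0, _, _ => false
  | fuel + 1, lo, hi =>
    if lo ≤ hi then
      if (PySem.Int.floordiv (lo + hi) 2) * (PySem.Int.floordiv (lo + hi) 2) = k then true
      else if (PySem.Int.floordiv (lo + hi) 2) * (PySem.Int.floordiv (lo + hi) 2) < k then
        isSquareLoop k fuel (PySem.Int.floordiv (lo + hi) 2 + 1) hi
      else
        isSquareLoop k fuel lo (PySem.Int.floordiv (lo + hi) 2 - 1)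
    else false

def isSquare (k : Int) : Bool := isSquareLoop k (k + 1).toNat 0 k

-- ''.join(c for i, c in enumerate(inStr) if i >= 1 and is_square(i))
def unHiddenMessage_alt (inStr : String) : String :=
  String.mk (((PySem.List.enumerate inStr.toList 0).filter
      (fun p => decide (1 ≤ p.1) && isSquare p.1)).map Prod.snd)

-- ===== PRECONDITION & SPEC =====
def Spec_unHiddenMessage (inStr : String) (out : String) : Prop := out = unHiddenMessage_alt inStr
instance (inStr : String) (out : String) : Decidable (Spec_unHiddenMessage inStr out) := by unfold Spec_unHiddenMessage; infer_instance

-- ===== CLAIM =====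
def Claim_equal_unHiddenMessage : Prop := ∀ (inStr : String), Dom_unHiddenMessage inStr → Spec_unHiddenMessage inStr (unHiddenMessage inStr)

-- ===== LEMMAS AND PROOFS =====

-- Binary-search correctness: with enough fuel, isSquareLoop finds a root in [lo, hi].
theorem isSquareLoop_iff (k : Int) :
    ∀ (fuel : Nat) (lo hi : Int), 0 ≤ lo → (hi + 1 - lo).toNat ≤ fuel →
      (isSquareLoop k fuel lo hi = true ↔ ∃ r : Int, lo ≤ r ∧ r ≤ hi ∧ r * r = k) := by
  intro fuel
  induction fuel with
  | zero =>
    intro lo hi hlo hf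
    simp only [isSquareLoop, Bool.false_eq_true, false_iff]
    rintro ⟨r, h1, h2, _⟩; omega
  | succ fuel ih =>
    intro lo hi hlo hf
    simp only [isSquareLoop]
    by_cases h : lo ≤ hi
    · have hb := PySem.Int.floordiv_two_mid_bounds h
      simp only [h, if_true]
      by_cases heq : (PySem.Int.floordiv (lo + hi) 2) * (PySem.Int.floordiv (lo + hi) 2) = k
      · simp only [heq, if_true, true_iff]
        exact ⟨_, hb.1, hb.2, heq⟩
      · simp only [heq, if_false]
        by_cases hlt : (PySem.Int.floordiv (lo + hi) 2) * (PySem.Int.floordiv (lo + hi) 2) < k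
        · simp only [hlt, if_true]
          rw [ih _ _ (by omega) (by omega)]
          constructor
          · rintro ⟨r, h1, h2, h3⟩; exact ⟨r, by omega, h2, h3⟩
          · rintro ⟨r, h1, h2, h3⟩
            refine ⟨r, ?_, h2, h3⟩
            by_contra hc
            have hrm : r ≤ PySem.Int.floordiv (lo + hi) 2 := by omega
            have : r * r ≤ (PySem.Int.floordiv (lo + hi) 2) * (PySem.Int.floordiv (lo + hi) 2) :=
              mul_le_mul hrm hrm (by omega) (by omega)
            omega
        · simp only [hlt, if_false]
          rw [ih _ _ hlo (by omega)]
          constructor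
          · rintro ⟨r, h1, h2, h3⟩; exact ⟨r, h1, by omega, h3⟩
          · rintro ⟨r, h1, h2, h3⟩
            refine ⟨r, h1, ?_, h3⟩
            by_contra hc
            have hrm : PySem.Int.floordiv (lo + hi) 2 ≤ r := by omega
            have : (PySem.Int.floordiv (lo + hi) 2) * (PySem.Int.floordiv (lo + hi) 2) ≤ r * r :=
              mul_le_mul hrm hrm (by omega) (by omega)
            omega
    · simp only [h, if_false, Bool.false_eq_true, false_iff]
      rintro ⟨r, h1, h2, _⟩; omega

theorem isSquare_natCast (k : Nat) :
    isSquare (k : Int) = decide (∃ r : Nat, r ≤ k ∧ r * r = k) := by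
  rw [Bool.eq_iff_iff, isSquare, isSquareLoop_iff k _ 0 (k : Int) le_rfl (by omega), decide_eq_true_iff]
  constructor
  · rintro ⟨r, h1, h2, h3⟩
    refine ⟨r.toNat, by omega, ?_⟩
    have hr : ((r.toNat : Int)) = r := by omega
    have hk : ((r.toNat * r.toNat : Nat) : Int) = (k : Int) := by push_cast; rw [hr]; exact h3
    exact_mod_cast hk
  · rintro ⟨r, h1, h2⟩
    exact ⟨(r : Int), by omega, by omega, by exact_mod_cast h2⟩

-- Square indices below n, from i on (the canonical middle form both ports reach).
def sqIdx (i n : Nat) : List Nat :=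
  (List.range n).filter (fun k => decide (i * i ≤ k) && decide (∃ r : Nat, r ≤ k ∧ r * r = k))

theorem sqIdx_nil (i n : Nat) (h : n ≤ i * i) : sqIdx i n = [] := by
  unfold sqIdx
  rw [List.filter_eq_nil_iff]
  intro k hk
  simp only [List.mem_range] at hk
  simp only [Bool.and_eq_true, decide_eq_true_iff, not_and]
  intro h1; omega

theorem sqIdx_cons (i n : Nat) (h : i * i < n) : sqIdx i n = i * i :: sqIdx (i + 1) n := by
  induction n with
  | zero => omega
  | succ n ih =>
    unfold sqIdx at *
    rw [List.range_succ, List.filter_append, List.filter_append]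
    by_cases hlt : i * i < n
    · rw [ih hlt]
      have hpe : (decide (i * i ≤ n) && decide (∃ r : Nat, r ≤ n ∧ r * r = n))
          = (decide ((i + 1) * (i + 1) ≤ n) && decide (∃ r : Nat, r ≤ n ∧ r * r = n)) := by
        by_cases hex : ∃ r : Nat, r ≤ n ∧ r * r = n
        · obtain ⟨r, hr1, hr2⟩ := hex
          have hri : i < r := by
            by_contra hc
            have : r * r ≤ i * i := Nat.mul_le_mul (by omega) (by omega)
            omega
          have hb : (i + 1) * (i + 1) ≤ n := by
            calc (i + 1) * (i + 1) ≤ r * r := Nat.mul_le_mul (by omega) (by omega)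
              _ = n := hr2
          have hx : ∃ r : Nat, r ≤ n ∧ r * r = n := ⟨r, hr1, hr2⟩
          simp [hb, Nat.le_of_lt hlt, hx]
        · simp [hex]
      rw [List.filter_cons, List.filter_cons, List.filter_nil, hpe]
      simp
    · have hn : n = i * i := by omega
      have e1 : (List.range n).filter
          (fun k => decide (i * i ≤ k) && decide (∃ r : Nat, r ≤ k ∧ r * r = k)) = [] := by
        have := sqIdx_nil i n (by omega); unfold sqIdx at this; exact this
      have e2 : (List.range n).filter
          (fun k => decide ((i + 1) * (i + 1) ≤ k) && decide (∃ r : Nat, r ≤ k ∧ r * r = k)) = [] := by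
        have := sqIdx_nil (i + 1) n (by nlinarith); unfold sqIdx at this; exact this
      rw [e1, e2]
      subst hn
      have hi : i ≤ i * i := by nlinarith
      have hx : ∃ r : Nat, r ≤ i * i ∧ r * r = i * i := ⟨i, hi, rfl⟩
      have hb2 : ¬ ((i + 1) * (i + 1) ≤ i * i) := by nlinarith
      simp [hx, hb2]

-- A's loop, at state (i*i, 2*i+1), appends the characters at the square indices from i on.
theorem loopA_eq_sqIdx (cs : List Char) :
    ∀ (fuel i : Nat) (ans : List Char), cs.length - i * i ≤ fuel →
      unHiddenMessageLoopA cs fuel (i * i) (2 * i + 1) ans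
        = ans ++ (sqIdx i cs.length).map (fun k => cs.getD k 'A') := by
  intro fuel
  induction fuel with
  | zero =>
    intro i ans h
    have hge : cs.length ≤ i * i := by omega
    simp only [unHiddenMessageLoopA]
    rw [sqIdx_nil i _ hge]
    simp
  | succ fuel ih =>
    intro i ans h
    simp only [unHiddenMessageLoopA]
    by_cases hlt : i * i < cs.length
    · simp only [hlt, dif_pos]
      have h1 : i * i + (2 * i + 1) = (i + 1) * (i + 1) := by ring
      have h2 : 2 * i + 1 + 2 = 2 * (i + 1) + 1 := by ring
      simp only [h1, h2]
      have hsq : i * i < (i + 1) * (i + 1) := by nlinarith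
      rw [ih (i + 1) (ans ++ [cs[i * i]]) (by omega), sqIdx_cons i _ hlt]
      simp [List.getD_eq_getElem?_getD, List.getElem?_eq_getElem hlt]
    · rw [sqIdx_nil i _ (by omega)]
      simp [hlt]

-- B's enumerate-filter-join reaches the same canonical form with i = 1.
theorem altList_eq_sqIdx (cs : List Char) :
    ((PySem.List.enumerate cs 0).filter (fun p => decide (1 ≤ p.1) && isSquare p.1)).map Prod.snd
      = (sqIdx 1 cs.length).map (fun k => cs.getD k 'A') := by
  rw [PySem.List.enumerate_eq_map_pyRange cs 'A', PySem.List.len_eq, PySem.List.pyRange_zero_natCast,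
    List.map_map, List.filter_map, List.map_map]
  have hpred : ∀ k ∈ List.range cs.length,
      ((fun p : Int × Char => decide (1 ≤ p.1) && isSquare p.1) ∘
        ((fun j : Int => (j, PySem.List.pyGetD cs j 'A')) ∘ (fun k : Nat => (k : Int)))) k
      = (fun k => decide (1 * 1 ≤ k) && decide (∃ r : Nat, r ≤ k ∧ r * r = k)) k := by
    intro k _
    simp only [Function.comp_apply, isSquare_natCast]
    congr 1
    simp only [decide_eq_decide]
    omega
  rw [List.filter_congr hpred]
  unfold sqIdx
  rw [List.map_congr_left]
  intro k hk
  simp only [Function.comp_apply, PySem.List.pyGetD_natCast]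

-- ===== VERDICT =====
theorem unHiddenMessage_spec : Claim_equal_unHiddenMessage := by
  intro inStr _
  unfold Spec_unHiddenMessage unHiddenMessage unHiddenMessage_alt
  rw [altList_eq_sqIdx]
  have h : unHiddenMessageLoopA inStr.toList inStr.toList.length 1 3 []
      = [] ++ (sqIdx 1 inStr.toList.length).map (fun k => inStr.toList.getD k 'A') :=
    loopA_eq_sqIdx inStr.toList inStr.toList.length 1 [] (by omega)
  rw [h]
  rfl
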